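-- pv_equiv track=rewrite | github.com/Victor-BM/UFRJ | Computação I/Atividades/Laboratório 7/Teste 3.py | contaestrelas
-- ===== SOURCE A (Python) =====
-- def contaestrelas (aval):
--     '''Função que retorna quantas estrelas
--     de cada tipo o motorista ganhou
--     list -> list'''
--     total_estrelas= [0, 0, 0, 0, 0]
--     i = 0
--     while i<len(aval):
--         j = 1
--         while j<=5:
--             count = 0
--             if aval[i] == j:
--                 count = total_estrelas[j-1]
--                 count += 1
--                 total_estrelas[j-1] = count
--                 break
--             j +=1
--         i += 1
--     return total_estrelas
-- ===== SOURCE B (Python) =====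
-- def contaestrelas(aval):
--     '''Função que retorna quantas estrelas
--     de cada tipo o motorista ganhou
--     list -> list'''
--     return [aval.count(j) for j in range(1, 6)]
-- ===== Notes on version B (the rewrite author's own statement) =====
-- stated objective: simpler
-- what changed: Inverts the traversal: instead of A's per-element loop with an inner bucket search mutating an accumulator, B makes one full scan per rating (list.count for j in 1..5), a staged-passes readout with no mutable state.
import Mathlib
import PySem

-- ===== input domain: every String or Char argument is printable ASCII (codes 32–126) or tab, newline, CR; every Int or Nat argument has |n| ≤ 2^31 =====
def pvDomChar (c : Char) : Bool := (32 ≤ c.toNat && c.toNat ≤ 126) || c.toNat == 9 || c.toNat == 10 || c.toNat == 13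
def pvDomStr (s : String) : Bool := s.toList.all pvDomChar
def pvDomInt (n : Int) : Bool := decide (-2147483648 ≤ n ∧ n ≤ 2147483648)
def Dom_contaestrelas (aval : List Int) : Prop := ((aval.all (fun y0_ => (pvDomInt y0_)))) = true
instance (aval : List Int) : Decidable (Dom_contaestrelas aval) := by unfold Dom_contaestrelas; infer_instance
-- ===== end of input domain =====

-- B inverts A's traversal: instead of a per-element loop with an inner bucket
-- search mutating an accumulator, B does one full scan per rating
-- ([aval.count(j) for j in range(1,6)]) with no mutable state (simpler).


-- ===== PORT A =====
-- inner 'while j <= 5' loop of A: the first j with aval[i] == j bumps total_estrelas[j-1] and breaks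
def contaestrelasInner (t : List Int) (x : Int) (j : Int) : List Int :=
  if h : j ≤ 5 then
    if x = j then t.set (j - 1).toNat (t.getD (j - 1).toNat 0 + 1)
    else contaestrelasInner t x (j + 1)
  else t
termination_by (6 - j).toNat
decreasing_by omega

-- outer 'while i < len(aval)' loop of A over the elements of aval
def contaestrelas (aval : List Int) : List Int :=
  aval.foldl (fun t x => contaestrelasInner t x 1) [0, 0, 0, 0, 0]

-- ===== PORT B =====
-- return [aval.count(j) for j in range(1, 6)]
def contaestrelas_alt (aval : List Int) : List Int :=
  (PySem.List.pyRange 1 6 1).map (fun j => (PySem.List.count aval j : Int))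

-- ===== PRECONDITION & SPEC =====
def Spec_contaestrelas (aval : List Int) (out : List Int) : Prop := out = contaestrelas_alt aval
instance (aval : List Int) (out : List Int) : Decidable (Spec_contaestrelas aval out) := by unfold Spec_contaestrelas; infer_instance

-- ===== CLAIM (what is proved, stated in full; the proofs are below) =====
def Claim_equal_contaestrelas : Prop := ∀ (aval : List Int), Dom_contaestrelas aval → Spec_contaestrelas aval (contaestrelas aval)

-- ===== LEMMAS AND PROOFS =====

lemma inner_stop (t : List Int) (x : Int) : contaestrelasInner t x 6 = t := by
  unfold contaestrelasInner; norm_num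

lemma inner_step (t : List Int) (x j : Int) (hj : j ≤ 5) :
    contaestrelasInner t x j =
      if x = j then t.set (j - 1).toNat (t.getD (j - 1).toNat 0 + 1)
      else contaestrelasInner t x (j + 1) := by
  conv_lhs => unfold contaestrelasInner
  rw [dif_pos hj]

lemma step_eval (a b c d e x : Int) :
    contaestrelasInner [a, b, c, d, e] x 1 =
      if x = 1 then [a + 1, b, c, d, e]
      else if x = 2 then [a, b + 1, c, d, e]
      else if x = 3 then [a, b, c + 1, d, e]
      else if x = 4 then [a, b, c, d + 1, e]
      else if x = 5 then [a, b, c, d, e + 1]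
      else [a, b, c, d, e] := by
  rw [inner_step _ _ 1 (by norm_num)]; simp only [Int.reduceAdd]
  rw [inner_step _ _ 2 (by norm_num)]; simp only [Int.reduceAdd]
  rw [inner_step _ _ 3 (by norm_num)]; simp only [Int.reduceAdd]
  rw [inner_step _ _ 4 (by norm_num)]; simp only [Int.reduceAdd]
  rw [inner_step _ _ 5 (by norm_num)]; simp only [Int.reduceAdd]
  norm_num [inner_stop]
  simp only [show Int.toNat 2 = 2 from rfl, show Int.toNat 3 = 3 from rfl, show Int.toNat 4 = 4 from rfl]
  simp [List.set]

lemma foldl_eval (l : List Int) (a b c d e : Int) :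
    l.foldl (fun t x => contaestrelasInner t x 1) [a, b, c, d, e] =
      [a + l.count 1, b + l.count 2, c + l.count 3, d + l.count 4, e + l.count 5] := by
  induction l generalizing a b c d e with
  | nil => simp
  | cons x xs ih =>
    simp only [List.foldl_cons, step_eval]
    split_ifs with h1 h2 h3 h4 h5 <;>
      simp only [List.count_cons, List.cons.injEq, *] <;>
      norm_num <;> omega

lemma alt_eval (aval : List Int) :
    contaestrelas_alt aval =
      [(aval.count 1 : Int), aval.count 2, aval.count 3, aval.count 4, aval.count 5] := by
  unfold contaestrelas_alt
  rw [show PySem.List.pyRange 1 6 1 = [1, 2, 3, 4, 5] from rfl]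
  simp [PySem.List.count_eq]

-- ===== VERDICT (by name: the statement is the Claim_ definition above) =====
theorem contaestrelas_spec : Claim_equal_contaestrelas := by
  intro aval _
  unfold Spec_contaestrelas contaestrelas
  rw [alt_eval, foldl_eval]
  norm_num
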